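-- pv_equiv track=rewrite | github.com/codersbranch/rag_tutorial_step_by_step | chapter4_chunking/document_struct_chunking.py | structure_based_chunking
-- ===== SOURCE A (Python) =====
-- def structure_based_chunking(text):
--     """
--     Splits text using headings as chunk boundaries.
--     Assumes headings start with '##'
--     """
--     chunks = []
--     current_chunk = ""
--
--     for line in text.split("\n"):
--         if line.startswith("##"):
--             if current_chunk:
--                 chunks.append(current_chunk.strip())
--             current_chunk = line + "\n"
--         else:
--             current_chunk += line + "\n"
--
--     if current_chunk:
--         chunks.append(current_chunk.strip())
--
--     return chunks
-- ===== SOURCE B (Python) =====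
-- def structure_based_chunking(text):
--     """
--     Splits text using headings as chunk boundaries.
--     Assumes headings start with '##'
--     """
--     lines = text.split("\n")
--
--     def segments(ls):
--         if not ls:
--             return []
--         i = 1
--         while i < len(ls) and not ls[i].startswith("##"):
--             i += 1
--         return [ls[:i]] + segments(ls[i:])
--
--     return ["\n".join(seg).strip() for seg in segments(lines)]
-- ===== Notes on version B (the rewrite author's own statement) =====
-- stated objective: alternative
-- what changed: A accumulates a growing current_chunk string inside one stateful pass; B first recursively groups the line list into heading-delimited segments (takeWhile/dropWhile style) and then maps join+strip over the segments.
import Mathlib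
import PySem

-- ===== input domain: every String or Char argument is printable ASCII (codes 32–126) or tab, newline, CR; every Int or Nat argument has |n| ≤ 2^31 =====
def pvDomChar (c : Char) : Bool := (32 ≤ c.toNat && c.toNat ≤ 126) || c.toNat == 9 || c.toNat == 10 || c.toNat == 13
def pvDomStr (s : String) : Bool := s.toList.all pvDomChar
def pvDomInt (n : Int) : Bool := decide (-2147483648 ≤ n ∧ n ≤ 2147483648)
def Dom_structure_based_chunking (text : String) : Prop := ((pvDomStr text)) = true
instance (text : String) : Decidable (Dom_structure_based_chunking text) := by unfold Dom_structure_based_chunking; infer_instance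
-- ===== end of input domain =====

-- B replaces A's accumulate-as-you-go pass with a recursive grouping of the line list
-- into segments followed by a join/strip map (alternative decomposition, same cost).

-- ===== PORT A =====
-- one loop step: the body of A's `for line in text.split("\n")`
def sbcStepA (st : List (List Char) × List Char) (line : List Char) :
    List (List Char) × List Char :=
  if PySem.Chars.startswith line ['#', '#'] then
    (if st.2 ≠ [] then st.1 ++ [PySem.Chars.strip st.2] else st.1, line ++ ['\n'])
  else
    (st.1, st.2 ++ line ++ ['\n'])

def structure_based_chunking (text : String) : List String :=
  let lines := PySem.Chars.splitOn text.toList ['\n']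
  let st := lines.foldl sbcStepA ([], [])
  (if st.2 ≠ [] then st.1 ++ [PySem.Chars.strip st.2] else st.1).map String.ofList

-- ===== PORT B =====
-- Source B's `segments`: the while loop advancing i is takeWhile/dropWhile on the tail
def sbcSegments : List (List Char) → List (List (List Char))
  | [] => []
  | l :: rest =>
    (l :: rest.takeWhile (fun s => !PySem.Chars.startswith s ['#', '#'])) ::
      sbcSegments (rest.dropWhile (fun s => !PySem.Chars.startswith s ['#', '#']))
termination_by ls => ls.length
decreasing_by
  simpa using Nat.lt_succ_of_le (List.length_dropWhile_le _ _)

def structure_based_chunking_alt (text : String) : List String :=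
  (sbcSegments (PySem.Chars.splitOn text.toList ['\n'])).map
    (fun seg => String.ofList (PySem.Chars.strip (PySem.Chars.join ['\n'] seg)))

-- ===== PRECONDITION & SPEC =====
def Spec_structure_based_chunking (text : String) (out : List String) : Prop := out = structure_based_chunking_alt text
instance (text : String) (out : List String) : Decidable (Spec_structure_based_chunking text out) := by unfold Spec_structure_based_chunking; infer_instance

-- ===== CLAIM (what is proved, stated in full; the proofs are below) =====
def Claim_equal_structure_based_chunking : Prop := ∀ (text : String), Dom_structure_based_chunking text → Spec_structure_based_chunking text (structure_based_chunking text)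

-- ===== LEMMAS AND PROOFS =====

-- A's `current_chunk` after consuming the lines of an open segment `seg`
def sbcJn (seg : List (List Char)) : List Char := seg.flatMap (fun l => l ++ ['\n'])

-- A's segment evolution, written as a recursion over the remaining lines
def sbcCollect (seg : List (List Char)) : List (List Char) → List (List (List Char))
  | [] => [seg]
  | l :: ls =>
    if PySem.Chars.startswith l ['#', '#'] then seg :: sbcCollect [l] ls
    else sbcCollect (seg ++ [l]) ls

theorem sbcJn_ne_nil (seg : List (List Char)) (h : seg ≠ []) : sbcJn seg ≠ [] := by
  cases seg with
  | nil => exact absurd rfl h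
  | cons a t => simp [sbcJn]

theorem sbcJn_append (seg : List (List Char)) (l : List Char) :
    sbcJn (seg ++ [l]) = sbcJn seg ++ l ++ ['\n'] := by
  simp [sbcJn]

theorem sbcJn_eq_join (seg : List (List Char)) (h : seg ≠ []) :
    sbcJn seg = PySem.Chars.join ['\n'] seg ++ ['\n'] := by
  induction seg with
  | nil => exact absurd rfl h
  | cons a t ih =>
    cases t with
    | nil => simp [sbcJn, PySem.Chars.join, List.intercalate]
    | cons b u =>
      have ihx := ih (by simp)
      rw [PySem.Chars.join_cons_cons]
      simp only [sbcJn, List.flatMap_cons] at ihx ⊢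
      rw [ihx]
      simp

theorem sbcStrip_append_newline (x : List Char) :
    PySem.Chars.strip (x ++ ['\n']) = PySem.Chars.strip x := by
  simp only [PySem.Chars.strip, PySem.Chars.lstrip, PySem.Chars.rstrip,
    List.dropWhile_append]
  by_cases h : (List.dropWhile PySem.Chars.isspace x).isEmpty = true
  · rw [if_pos h]
    rw [List.isEmpty_iff] at h
    rw [h]
    decide
  · rw [if_neg h]
    simp [List.reverse_append,
      show PySem.Chars.isspace '\n' = true from by decide]

theorem sbcStrip_jn (seg : List (List Char)) (h : seg ≠ []) :
    PySem.Chars.strip (sbcJn seg) = PySem.Chars.strip (PySem.Chars.join ['\n'] seg) := by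
  rw [sbcJn_eq_join seg h, sbcStrip_append_newline]

theorem sbcCollect_eq_segments (rest : List (List Char)) :
    ∀ seg, sbcCollect seg rest =
      (seg ++ rest.takeWhile (fun s => !PySem.Chars.startswith s ['#', '#'])) ::
        sbcSegments (rest.dropWhile (fun s => !PySem.Chars.startswith s ['#', '#'])) := by
  induction rest with
  | nil => intro seg; simp [sbcCollect, sbcSegments]
  | cons l ls ih =>
    intro seg
    by_cases h : PySem.Chars.startswith l ['#', '#'] = true
    · simp [sbcCollect, h, sbcSegments, ih]
    · simp [sbcCollect, h, ih]

theorem sbcLoop (rest : List (List Char)) :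
    ∀ chunks seg, seg ≠ [] →
      (let st := rest.foldl sbcStepA (chunks, sbcJn seg)
        if st.2 ≠ [] then st.1 ++ [PySem.Chars.strip st.2] else st.1) =
      chunks ++ (sbcCollect seg rest).map
        (fun s => PySem.Chars.strip (PySem.Chars.join ['\n'] s)) := by
  induction rest with
  | nil =>
    intro chunks seg h
    simp [sbcCollect, sbcJn_ne_nil seg h, sbcStrip_jn seg h]
  | cons l ls ih =>
    intro chunks seg h
    simp only [List.foldl_cons]
    by_cases hl : PySem.Chars.startswith l ['#', '#'] = true
    · have : sbcStepA (chunks, sbcJn seg) l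
          = (chunks ++ [PySem.Chars.strip (sbcJn seg)], sbcJn [l]) := by
        simp only [sbcStepA, hl, if_true, sbcJn, List.flatMap_cons, List.flatMap_nil,
          List.append_nil, ne_eq]
        rw [if_pos (by simpa [sbcJn, ne_eq] using sbcJn_ne_nil seg h)]
      rw [this, ih (chunks ++ [PySem.Chars.strip (sbcJn seg)]) [l] (by simp)]
      simp only [sbcCollect, hl, if_pos, List.map_cons, sbcStrip_jn seg h, List.append_assoc,
        List.cons_append, List.nil_append]
    · have : sbcStepA (chunks, sbcJn seg) l = (chunks, sbcJn (seg ++ [l])) := by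
        simp [sbcStepA, hl, sbcJn_append]
      rw [this, ih chunks (seg ++ [l]) (by simp)]
      simp [sbcCollect, hl]

-- ===== VERDICT (by name: the statement is the Claim_ definition above) =====
theorem structure_based_chunking_spec : Claim_equal_structure_based_chunking := by
  intro text _
  unfold Spec_structure_based_chunking structure_based_chunking structure_based_chunking_alt
  cases hls : PySem.Chars.splitOn text.toList ['\n'] with
  | nil => simp [sbcSegments]
  | cons l0 rest =>
    have h0 : sbcStepA ([], []) l0 = ([], sbcJn [l0]) := by
      by_cases h : PySem.Chars.startswith l0 ['#', '#'] = true <;>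
        simp [sbcStepA, h, sbcJn]
    simp only [List.foldl_cons, h0]
    rw [show (let st := rest.foldl sbcStepA ([], sbcJn [l0]);
        (if st.2 ≠ [] then st.1 ++ [PySem.Chars.strip st.2] else st.1)) =
        [] ++ (sbcCollect [l0] rest).map
          (fun s => PySem.Chars.strip (PySem.Chars.join ['\n'] s)) from
      sbcLoop rest [] [l0] (by simp)]
    rw [sbcCollect_eq_segments rest [l0]]
    simp [sbcSegments]
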